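-- pv_equiv track=rewrite | github.com/rlecomte1929/rolec | backend/services/policy_template_first_import.py | _merge_comparison_hints
-- ===== SOURCE A (Python) =====
-- from typing import Any, Dict, List, Optional, Sequence, Tuple
--
-- def _merge_comparison_hints(hints: Sequence[str]) -> str:
--     hs = [str(h or "partial").strip() for h in hints if h]
--     if not hs:
--         return "partial"
--     if any(h == "draft_only" for h in hs):
--         return "draft_only"
--     if any(h == "not_ready" for h in hs):
--         return "not_ready"
--     if any(h == "external_reference" for h in hs):
--         return "external_reference"
--     if any(h == "partial" for h in hs):
--         return "partial"
--     if all(h == "ready" for h in hs):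
--         return "ready"
--     return hs[-1]
-- ===== SOURCE B (Python) =====
-- _TOKENS = ["ready", "partial", "external_reference", "not_ready", "draft_only"]
--
-- def _rank(s):
--     # severity rank of a normalized hint; -1 for tokens outside the vocabulary
--     if s == "ready":
--         return 0
--     if s == "partial":
--         return 1
--     if s == "external_reference":
--         return 2
--     if s == "not_ready":
--         return 3
--     if s == "draft_only":
--         return 4
--     return -1
--
-- def _merge_comparison_hints(hints):
--     # Single pass: track the highest severity rank seen, whether any unknown
--     # token was seen, and the last normalized hint (for the fallback).
--     best, seen_other, last = -1, False, None
--     for h in hints: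
--         if not h:
--             continue
--         s = str(h).strip()
--         r = _rank(s)
--         if r < 0:
--             seen_other = True
--         elif r > best:
--             best = r
--         last = s
--     if last is None:
--         return "partial"
--     if best >= 1:
--         return _TOKENS[best]
--     if not seen_other:
--         return "ready"
--     return last
-- ===== Notes on version B (the rewrite author's own statement) =====
-- stated objective: alternative
-- what changed: Replaces A's staged passes (four any() scans, an all() scan, then indexing) by a single pass over the hints that folds an accumulator (highest severity rank per a token-rank classifier, unknown-token flag, last normalized hint) and decides the result from that state.
import Mathlib
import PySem

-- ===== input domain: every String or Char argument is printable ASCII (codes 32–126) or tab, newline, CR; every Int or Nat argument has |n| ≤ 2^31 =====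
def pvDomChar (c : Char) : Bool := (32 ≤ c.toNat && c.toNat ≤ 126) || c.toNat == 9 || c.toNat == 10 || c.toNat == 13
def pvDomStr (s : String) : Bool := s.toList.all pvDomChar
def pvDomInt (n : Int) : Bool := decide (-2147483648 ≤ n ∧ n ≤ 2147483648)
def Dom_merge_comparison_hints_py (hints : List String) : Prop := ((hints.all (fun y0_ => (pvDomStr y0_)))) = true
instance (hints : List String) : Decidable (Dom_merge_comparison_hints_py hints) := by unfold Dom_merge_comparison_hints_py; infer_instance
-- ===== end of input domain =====

-- B replaces A's staged any()/all() scans by one single-pass fold that tracks the highest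
-- severity rank, an unknown-token flag and the last normalized hint (objective: alternative).


-- ===== PORT A =====
def merge_comparison_hints_py (hints : List String) : String :=
  let hs := (hints.filter (fun h => h ≠ "")).map PySem.Str.strip
  if hs = [] then "partial"
  else if hs.any (fun h => h == "draft_only") then "draft_only"
  else if hs.any (fun h => h == "not_ready") then "not_ready"
  else if hs.any (fun h => h == "external_reference") then "external_reference"
  else if hs.any (fun h => h == "partial") then "partial"
  else if hs.all (fun h => h == "ready") then "ready"
  else PySem.List.pyGetD hs (-1) ""

-- ===== PORT B =====
def pvTokens : List String := ["ready", "partial", "external_reference", "not_ready", "draft_only"]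

-- Source B's _rank helper: severity rank of one normalized hint, -1 if unknown
def pvRnk (s : String) : Int :=
  if s = "ready" then 0 else if s = "partial" then 1 else if s = "external_reference" then 2
  else if s = "not_ready" then 3 else if s = "draft_only" then 4 else -1

-- one loop iteration of Source B: state = (best, seen_other, last)
def pvStep (st : Int × Bool × Option String) (h : String) : Int × Bool × Option String :=
  if h = "" then st
  else
    let s := PySem.Str.strip h
    let r := pvRnk s
    ((if r < 0 then st.1 else if r > st.1 then r else st.1),
     (if r < 0 then true else st.2.1),
     some s)

def merge_comparison_hints_py_alt (hints : List String) : String :=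
  let st := hints.foldl pvStep (-1, false, none)
  match st.2.2 with
  | none => "partial"
  | some last =>
    if 1 ≤ st.1 then PySem.List.pyGetD pvTokens st.1 ""
    else if !st.2.1 then "ready"
    else last

-- ===== PRECONDITION & SPEC =====
def Spec_merge_comparison_hints_py (hints : List String) (out : String) : Prop := out = merge_comparison_hints_py_alt hints
instance (hints : List String) (out : String) : Decidable (Spec_merge_comparison_hints_py hints out) := by unfold Spec_merge_comparison_hints_py; infer_instance

-- ===== CLAIM (what is proved, stated in full; the proofs are below) =====
def Claim_equal_merge_comparison_hints_py : Prop := ∀ (hints : List String), Dom_merge_comparison_hints_py hints → Spec_merge_comparison_hints_py hints (merge_comparison_hints_py hints)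

-- ===== LEMMAS AND PROOFS =====

lemma pvRnk_ge (s : String) : -1 ≤ pvRnk s := by
  unfold pvRnk; split_ifs <;> norm_num

lemma pvRnk_le (s : String) : pvRnk s ≤ 4 := by
  unfold pvRnk; split_ifs <;> norm_num

-- the fold of Source B, characterized component-wise over the normalized list hs
lemma pvFold_char (hints : List String) : ∀ (b : Int) (o : Bool) (l : Option String), -1 ≤ b →
    hints.foldl pvStep (b, o, l) =
      (let hs := (hints.filter (fun h => h ≠ "")).map PySem.Str.strip;
       ((hs.map pvRnk).foldl max b,
        o || hs.any (fun s => decide (pvRnk s < 0)),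
        hs.foldl (fun _ s => some s) l)) := by
  induction hints with
  | nil => intro b o l _; simp
  | cons h t ih =>
    intro b o l hb
    by_cases hh : h = ""
    · simpa [pvStep, hh] using ih b o l hb
    · simp only [List.foldl_cons, pvStep, hh, if_false]
      rw [ih _ _ _ (by have := pvRnk_ge (PySem.Str.strip h); split_ifs <;> omega)]
      simp only [List.filter_cons, hh, decide_not]
      have hmax : (if pvRnk (PySem.Str.strip h) < 0 then b else
          if pvRnk (PySem.Str.strip h) > b then pvRnk (PySem.Str.strip h) else b)
          = max b (pvRnk (PySem.Str.strip h)) := by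
        have := pvRnk_ge (PySem.Str.strip h)
        split_ifs <;> omega
      have hseen : (if pvRnk (PySem.Str.strip h) < 0 then true else o)
          = (decide (pvRnk (PySem.Str.strip h) < 0) || o) := by
        split_ifs with hlt <;> simp [hlt]
      simp [hmax, hseen, Bool.or_comm, Bool.or_assoc]

lemma pvFoldMax_ge (l : List Int) : ∀ (b k : Int), k ≤ l.foldl max b ↔ k ≤ b ∨ ∃ x ∈ l, k ≤ x := by
  induction l with
  | nil => simp
  | cons a t ih =>
    intro b k
    simp only [List.foldl_cons, ih, le_max_iff, List.mem_cons]
    constructor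
    · rintro ((h | h) | ⟨x, hx, hkx⟩)
      · exact .inl h
      · exact .inr ⟨a, .inl rfl, h⟩
      · exact .inr ⟨x, .inr hx, hkx⟩
    · rintro (h | ⟨x, (rfl | hx), hkx⟩)
      · exact .inl (.inl h)
      · exact .inl (.inr hkx)
      · exact .inr ⟨x, hx, hkx⟩

lemma pvFoldMax_le (l : List Int) : ∀ (b k : Int), l.foldl max b ≤ k ↔ b ≤ k ∧ ∀ x ∈ l, x ≤ k := by
  induction l with
  | nil => simp
  | cons a t ih =>
    intro b k
    simp only [List.foldl_cons, ih, max_le_iff, List.mem_cons]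
    constructor
    · rintro ⟨⟨hb, ha⟩, ht⟩
      exact ⟨hb, fun x hx => by rcases hx with rfl | hx; exact ha; exact ht x hx⟩
    · rintro ⟨hb, h⟩
      exact ⟨⟨hb, h a (.inl rfl)⟩, fun x hx => h x (.inr hx)⟩

lemma pvLastFold (hs : List String) (h : hs ≠ []) (l : Option String) :
    hs.foldl (fun _ s => some s) l = some (hs.getLast h) := by
  induction hs generalizing l with
  | nil => exact absurd rfl h
  | cons a t ih =>
    rcases t with _ | ⟨b, t⟩
    · simp
    · simpa [List.getLast] using ih (by simp) (some a)

-- ===== VERDICT (by name: the statement is the Claim_ definition above) =====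
theorem merge_comparison_hints_py_spec : Claim_equal_merge_comparison_hints_py := by
  intro hints _
  unfold Spec_merge_comparison_hints_py merge_comparison_hints_py merge_comparison_hints_py_alt
  rw [pvFold_char hints (-1) false none le_rfl]
  set hs := (hints.filter (fun h => h ≠ "")).map PySem.Str.strip with hhs
  by_cases h0 : hs = []
  · simp [h0]
  · simp only [h0, if_false]
    rw [pvLastFold hs h0 none]
    set best := (hs.map pvRnk).foldl max (-1) with hbest
    have hany : ∀ (t : String), (hs.any (fun h => h == t) = true) ↔ ∃ s ∈ hs, s = t := by
      intro t; simp
    have hge : ∀ (k : Int), k ≤ best ↔ k ≤ -1 ∨ ∃ s ∈ hs, k ≤ pvRnk s := by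
      intro k; rw [hbest, pvFoldMax_ge]
      constructor
      · rintro (h | ⟨x, hx, hkx⟩)
        · exact .inl h
        · obtain ⟨s, hsmem, rfl⟩ := List.mem_map.mp hx
          exact .inr ⟨s, hsmem, hkx⟩
      · rintro (h | ⟨s, hsmem, hks⟩)
        · exact .inl h
        · exact .inr ⟨pvRnk s, List.mem_map_of_mem hsmem, hks⟩
    have hle4 : best ≤ 4 := by
      rw [hbest, pvFoldMax_le]
      exact ⟨by norm_num, fun x hx => by obtain ⟨s, _, rfl⟩ := List.mem_map.mp hx; exact pvRnk_le s⟩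
    by_cases h1 : hs.any (fun h => h == "draft_only")
    · obtain ⟨s, hsm, rfl⟩ := (hany _).mp h1
      have h4b : (4:Int) ≤ best := (hge 4).mpr (.inr ⟨"draft_only", hsm, by simp [pvRnk]⟩)
      have hb4 : best = 4 := le_antisymm hle4 h4b
      simp [h1, hb4, pvTokens, PySem.List.pyGetD]
    · by_cases h2 : hs.any (fun h => h == "not_ready")
      · obtain ⟨s, hsm, rfl⟩ := (hany _).mp h2
        have hge3 : (3:Int) ≤ best := (hge 3).mpr (.inr ⟨"not_ready", hsm, by simp [pvRnk]⟩)
        have hlt4 : ¬ (4:Int) ≤ best := by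
          intro h4
          obtain ⟨t, htm, ht⟩ := ((hge 4).mp h4).resolve_left (by norm_num)
          have : t = "draft_only" := by
            unfold pvRnk at ht; split_ifs at ht <;> first | assumption | omega
          exact h1 ((hany _).mpr ⟨t, htm, this⟩)
        have hb3 : best = 3 := by omega
        simp [h1, h2, hb3, pvTokens, PySem.List.pyGetD]
      · by_cases h3 : hs.any (fun h => h == "external_reference")
        · obtain ⟨s, hsm, rfl⟩ := (hany _).mp h3
          have hge2 : (2:Int) ≤ best := (hge 2).mpr (.inr ⟨"external_reference", hsm, by simp [pvRnk]⟩)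
          have hlt3 : ¬ (3:Int) ≤ best := by
            intro hk
            obtain ⟨t, htm, ht⟩ := ((hge 3).mp hk).resolve_left (by norm_num)
            have hc : t = "draft_only" ∨ t = "not_ready" := by
              unfold pvRnk at ht; split_ifs at ht <;> simp_all
            rcases hc with h' | h'
            · exact h1 ((hany _).mpr ⟨t, htm, h'⟩)
            · exact h2 ((hany _).mpr ⟨t, htm, h'⟩)
          have hb2 : best = 2 := by omega
          simp [h1, h2, h3, hb2, pvTokens, PySem.List.pyGetD]
        · by_cases h4 : hs.any (fun h => h == "partial")
          · obtain ⟨s, hsm, rfl⟩ := (hany _).mp h4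
            have hge1 : (1:Int) ≤ best := (hge 1).mpr (.inr ⟨"partial", hsm, by simp [pvRnk]⟩)
            have hlt2 : ¬ (2:Int) ≤ best := by
              intro hk
              obtain ⟨t, htm, ht⟩ := ((hge 2).mp hk).resolve_left (by norm_num)
              have hc : t = "draft_only" ∨ t = "not_ready" ∨ t = "external_reference" := by
                unfold pvRnk at ht; split_ifs at ht <;> simp_all
              rcases hc with h' | h' | h'
              · exact h1 ((hany _).mpr ⟨t, htm, h'⟩)
              · exact h2 ((hany _).mpr ⟨t, htm, h'⟩)
              · exact h3 ((hany _).mpr ⟨t, htm, h'⟩)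
            have hb1 : best = 1 := by omega
            simp [h1, h2, h3, h4, hb1, pvTokens, PySem.List.pyGetD]
          · have hlt1 : ¬ (1:Int) ≤ best := by
              intro hk
              obtain ⟨t, htm, ht⟩ := ((hge 1).mp hk).resolve_left (by norm_num)
              have hc : t = "draft_only" ∨ t = "not_ready" ∨ t = "external_reference" ∨ t = "partial" := by
                unfold pvRnk at ht; split_ifs at ht <;> simp_all
              rcases hc with h' | h' | h' | h'
              · exact h1 ((hany _).mpr ⟨t, htm, h'⟩)
              · exact h2 ((hany _).mpr ⟨t, htm, h'⟩)
              · exact h3 ((hany _).mpr ⟨t, htm, h'⟩)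
              · exact h4 ((hany _).mpr ⟨t, htm, h'⟩)
            have hcase : ∀ s ∈ hs, s = "ready" ∨ pvRnk s < 0 := by
              intro s hsm
              by_cases hr : s = "ready"
              · exact .inl hr
              · right
                by_contra hge0
                push_neg at hge0
                have h1le : (1:Int) ≤ pvRnk s := by
                  unfold pvRnk at hge0 ⊢; split_ifs at hge0 ⊢ <;> omega
                exact hlt1 ((hge 1).mpr (.inr ⟨s, hsm, h1le⟩))
            by_cases hall : hs.all (fun h => h == "ready")
            · have hnoother : (hs.any (fun s => decide (pvRnk s < 0))) = false := by
                simp only [List.any_eq_false, decide_eq_true_eq]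
                intro s hsm
                have hsr : s = "ready" := by simpa using (List.all_eq_true.mp hall) s hsm
                simp [hsr, pvRnk]
              simp [h1, h2, h3, h4, hall, hlt1, hnoother]
            · have hother : (hs.any (fun s => decide (pvRnk s < 0))) = true := by
                simp only [List.all_eq_true] at hall
                push_neg at hall
                obtain ⟨s, hsm, hsne⟩ := hall
                have hneg : pvRnk s < 0 := ((hcase s hsm).resolve_left (by simpa using hsne))
                exact List.any_eq_true.mpr ⟨s, hsm, by simpa⟩
              simp [h1, h2, h3, h4, hall, hlt1, hother,
                PySem.List.pyGetD_neg_one (h := h0)]
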